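-- pv_equiv track=rewrite | github.com/Theo-Hafsaoui/Licence | License/L2/I33/tp/corection/tp6.py | circmultmat
-- ===== SOURCE A (Python) =====
-- def circmultmat(A,B):
-- 	P = []
-- 	n = len(A)
-- 	for i in range(n):
-- 		idxligneA = (-i % n)
-- 		aux = []
-- 		for j in range(n):
-- 			somme = 0
-- 			for k in range(n):
-- 				idxligneB = (-k % n)
-- 				somme = somme + A[(idxligneA+k) % n]*B[(idxligneB+j) % n]
-- 			aux = aux + [somme]
-- 		P = P + [aux]
-- 	return P
-- ===== SOURCE B (Python) =====
-- def circmultmat(A, B):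
--     # Circulant x circulant is circulant: compute the first row in O(n^2),
--     # then every other row is a cyclic right-rotation of it.
--     n = len(A)
--     row0 = [sum(A[k] * B[(j - k) % n] for k in range(n)) for j in range(n)]
--     return [row0[-i:] + row0[:-i] for i in range(n)]
-- ===== Notes on version B (the rewrite author's own statement) =====
-- stated objective: faster
-- what changed: A multiplies the two circulant matrices with three nested loops; B uses the fact that the product of circulant matrices is circulant, computes only the first row by a single double loop and produces every other row as a cyclic rotation of it.
import Mathlib
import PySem

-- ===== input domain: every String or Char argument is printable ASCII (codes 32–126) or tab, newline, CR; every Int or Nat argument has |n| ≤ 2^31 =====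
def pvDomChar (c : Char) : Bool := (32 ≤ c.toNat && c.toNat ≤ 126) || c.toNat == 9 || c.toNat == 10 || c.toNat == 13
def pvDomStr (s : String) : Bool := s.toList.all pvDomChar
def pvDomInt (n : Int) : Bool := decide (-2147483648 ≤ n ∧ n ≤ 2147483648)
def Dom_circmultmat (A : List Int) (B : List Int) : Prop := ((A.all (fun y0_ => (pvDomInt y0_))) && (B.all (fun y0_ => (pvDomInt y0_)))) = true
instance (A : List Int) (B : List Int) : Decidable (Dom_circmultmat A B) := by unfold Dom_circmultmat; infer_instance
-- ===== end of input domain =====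

-- B computes only the FIRST row of the product (circulant x circulant is circulant)
-- and fills the remaining rows by cyclic rotation: O(n^2) work instead of A's O(n^3).

-- ===== PORT A =====
def circmultmat (A : List Int) (B : List Int) : List (List Int) :=
  let n : Int := A.length
  (PySem.List.pyRange 0 n 1).foldl (fun P i =>
    let idxligneA := PySem.Int.mod (-i) n
    let aux := (PySem.List.pyRange 0 n 1).foldl (fun aux j =>
      let somme := (PySem.List.pyRange 0 n 1).foldl (fun somme k =>
        let idxligneB := PySem.Int.mod (-k) n
        somme + PySem.List.pyGetD A (PySem.Int.mod (idxligneA + k) n) 0 *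
                PySem.List.pyGetD B (PySem.Int.mod (idxligneB + j) n) 0) 0
      aux ++ [somme]) []
    P ++ [aux]) []

-- ===== PORT B =====
def circmultmat_alt (A : List Int) (B : List Int) : List (List Int) :=
  let n : Int := A.length
  let row0 : List Int := (PySem.List.pyRange 0 n 1).map (fun j =>
    (PySem.List.pyRange 0 n 1).foldl (fun s k =>
      s + PySem.List.pyGetD A k 0 * PySem.List.pyGetD B (PySem.Int.mod (j - k) n) 0) 0)
  (PySem.List.pyRange 0 n 1).map (fun i =>
    PySem.List.slice row0 (some (-i)) none ++ PySem.List.slice row0 none (some (-i)))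

-- ===== PRECONDITION & SPEC =====
-- Pre_ excludes exactly the inputs with len(B) < len(A), on which both A and B raise IndexError.
def Pre_circmultmat (A : List Int) (B : List Int) : Prop := A.length ≤ B.length
instance (A : List Int) (B : List Int) : Decidable (Pre_circmultmat A B) := by unfold Pre_circmultmat; infer_instance
def pvWitness_circmultmat : List Int × List Int := ([1, 2, 3], [4, 5, 6])

def Spec_circmultmat (A : List Int) (B : List Int) (out : List (List Int)) : Prop := out = circmultmat_alt A B
instance (A : List Int) (B : List Int) (out : List (List Int)) : Decidable (Spec_circmultmat A B out) := by unfold Spec_circmultmat; infer_instance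

-- ===== CLAIM (what is proved, stated in full; the proofs are below) =====
def Claim_equal_circmultmat : Prop := ∀ (A : List Int) (B : List Int), Dom_circmultmat A B → Pre_circmultmat A B → Spec_circmultmat A B (circmultmat A B)

-- ===== LEMMAS AND PROOFS =====

-- a Python-style sum over range(n) is a Finset sum
theorem pv_sum_pyRange (n : ℕ) (g : Int → Int) :
    ((PySem.List.pyRange 0 (n : Int) 1).map g).sum = ∑ k ∈ Finset.range n, g (k : Int) := by
  rw [PySem.List.pyRange_zero_natCast, List.map_map]; rfl

-- what A's double-mod index computes
theorem pv_emod_shift (x y N : Int) : ((-x) % N + y) % N = (y - x) % N := by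
  rw [Int.emod_add_emod]; congr 1; ring

-- A's port in normal form: a map of maps of Finset sums over range(n).
theorem pv_portA_nf (A B : List Int) (hpos : 0 < A.length) :
    circmultmat A B =
      (PySem.List.pyRange 0 (A.length : Int) 1).map (fun i =>
        (PySem.List.pyRange 0 (A.length : Int) 1).map (fun j =>
          ∑ k ∈ Finset.range A.length,
            PySem.List.pyGetD A (((k : Int) - i) % (A.length : Int)) 0 *
            PySem.List.pyGetD B ((j - (k : Int)) % (A.length : Int)) 0)) := by
  have hN : (0 : Int) < (A.length : Int) := by exact_mod_cast hpos
  unfold circmultmat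
  simp only [PySem.List.foldl_append_singleton_eq_map, List.nil_append,
    PySem.List.foldl_add, zero_add, PySem.Int.mod_eq_emod_of_pos hN]
  refine List.map_congr_left (fun i _ => ?_)
  refine List.map_congr_left (fun j _ => ?_)
  rw [pv_sum_pyRange]
  refine Finset.sum_congr rfl (fun k _ => ?_)
  rw [pv_emod_shift, pv_emod_shift]

-- B's port in normal form: the first row as Finset sums, rows as slices of it.
theorem pv_portB_nf (A B : List Int) (hpos : 0 < A.length) :
    circmultmat_alt A B =
      (PySem.List.pyRange 0 (A.length : Int) 1).map (fun i =>
        PySem.List.slice ((PySem.List.pyRange 0 (A.length : Int) 1).map (fun m =>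
          ∑ k ∈ Finset.range A.length,
            PySem.List.pyGetD A (k : Int) 0 *
            PySem.List.pyGetD B ((m - (k : Int)) % (A.length : Int)) 0)) (some (-i)) none ++
        PySem.List.slice ((PySem.List.pyRange 0 (A.length : Int) 1).map (fun m =>
          ∑ k ∈ Finset.range A.length,
            PySem.List.pyGetD A (k : Int) 0 *
            PySem.List.pyGetD B ((m - (k : Int)) % (A.length : Int)) 0)) none (some (-i))) := by
  have hN : (0 : Int) < (A.length : Int) := by exact_mod_cast hpos
  unfold circmultmat_alt
  simp only [PySem.List.foldl_add, zero_add, PySem.Int.mod_eq_emod_of_pos hN, pv_sum_pyRange]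

-- cast of the Nat rotation index
theorem pv_cast_rot (n i k : ℕ) (hi : i < n) :
    (((k + (n - i)) % n : ℕ) : Int) = ((k : Int) - i) % (n : Int) := by
  rw [Int.natCast_mod]
  push_cast [Nat.cast_sub hi.le]
  rw [show (k : Int) + ((n : Int) - i) = (k : Int) - i + n by ring, Int.add_emod_right]

-- The key reindexing: A's entry (i,j) equals B's first-row entry at (j + (n-i)) % n.
theorem pv_entry_eq (A B : List Int) (i j : ℕ) (hi : i < A.length) :
    (∑ k ∈ Finset.range A.length,
      PySem.List.pyGetD A (((k : Int) - i) % (A.length : Int)) 0 *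
      PySem.List.pyGetD B (((j : Int) - k) % (A.length : Int)) 0) =
    (∑ k ∈ Finset.range A.length,
      PySem.List.pyGetD A (k : Int) 0 *
      PySem.List.pyGetD B (((((j + (A.length - i)) % A.length : ℕ) : Int) - k) % (A.length : Int)) 0) := by
  have hpos : 0 < A.length := Nat.lt_of_le_of_lt (Nat.zero_le i) hi
  refine Finset.sum_nbij' (i := fun k => (k + (A.length - i)) % A.length)
    (j := fun k => (k + i) % A.length) ?_ ?_ ?_ ?_ ?_
  · intro a _; exact Finset.mem_range.mpr (Nat.mod_lt _ hpos)
  · intro a _; exact Finset.mem_range.mpr (Nat.mod_lt _ hpos)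
  · intro a ha
    have ha' := Finset.mem_range.mp ha
    show ((a + (A.length - i)) % A.length + i) % A.length = a
    rw [Nat.mod_add_mod, show a + (A.length - i) + i = a + A.length by omega,
      Nat.add_mod_right, Nat.mod_eq_of_lt ha']
  · intro a ha
    have ha' := Finset.mem_range.mp ha
    show ((a + i) % A.length + (A.length - i)) % A.length = a
    rw [Nat.mod_add_mod, show a + i + (A.length - i) = a + A.length by omega,
      Nat.add_mod_right, Nat.mod_eq_of_lt ha']
  · intro k _
    show _ = PySem.List.pyGetD A ((((k + (A.length - i)) % A.length : ℕ) : Int)) 0 * _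
    congr 1
    · congr 1
      exact (pv_cast_rot A.length i k hi).symm
    · congr 1
      rw [pv_cast_rot A.length i j hi, pv_cast_rot A.length i k hi, ← Int.sub_emod]
      congr 1
      ring

-- B's row i is the first row rotated right by i (a drop/take rotation).
theorem pv_rowB_eq (r : List Int) (n i : ℕ) (hlen : r.length = n) (hi : i < n) :
    PySem.List.slice r (some (-(i : Int))) none ++ PySem.List.slice r none (some (-(i : Int))) =
      r.rotate (n - i) := by
  rcases Nat.eq_zero_or_pos i with h0 | hipos
  · subst h0
    subst hlen
    rw [List.rotate_eq_drop_append_take (by omega)]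
    simp [PySem.List.slice_to]
  · rw [PySem.List.slice_from_neg_natCast r i hipos, PySem.List.slice_to_neg_natCast r i hipos,
      List.rotate_eq_drop_append_take (by omega), hlen]

-- ===== VERDICT (by name: the statement is the Claim_ definition above) =====
theorem circmultmat_spec : Claim_equal_circmultmat := by
  intro A B _ _
  show circmultmat A B = circmultmat_alt A B
  rcases Nat.eq_zero_or_pos A.length with h0 | hpos
  · simp [circmultmat, circmultmat_alt, h0, PySem.List.pyRange_one_eq_nil]
  · rw [pv_portA_nf A B hpos, pv_portB_nf A B hpos]
    refine List.map_congr_left (fun i hi => ?_)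
    have hibd : 0 ≤ i ∧ i < (A.length : Int) := PySem.List.mem_pyRange_one.mp hi
    have hicast : i = ((i.toNat : ℕ) : Int) := (Int.toNat_of_nonneg hibd.1).symm
    have hiN : i.toNat < A.length := by omega
    have hlen : ((PySem.List.pyRange 0 (A.length : Int) 1).map (fun m =>
        ∑ k ∈ Finset.range A.length,
          PySem.List.pyGetD A (k : Int) 0 *
          PySem.List.pyGetD B ((m - (k : Int)) % (A.length : Int)) 0)).length = A.length := by
      simp [PySem.List.length_pyRange_one]
    rw [hicast, pv_rowB_eq _ A.length i.toNat hlen hiN]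
    refine List.ext_getElem (by simp [List.length_rotate, PySem.List.length_pyRange_one]) ?_
    intro j hj1 hj2
    have hjN : j < A.length := by
      simpa [PySem.List.length_pyRange_one] using hj1
    rw [List.getElem_map, PySem.List.getElem_pyRange_one, List.getElem_rotate]
    simp only [hlen, List.getElem_map, PySem.List.getElem_pyRange_one, zero_add]
    exact pv_entry_eq A B i.toNat j hiN
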